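-- pv_equiv track=rewrite | github.com/sibyllinesoft/lens | scripts/deployment_gate_validator.py | _compute_max_consecutive_violations
-- ===== SOURCE A (Python) =====
-- from typing import Dict, List, Tuple, Optional, Any, Union
--
-- def _compute_max_consecutive_violations(window_results: List[Dict[str, Any]]) -> int:
--     """Compute maximum consecutive violations across all windows."""
--     consecutive = 0
--     max_consecutive = 0
--
--     for window in window_results:
--         if window['has_violations']:
--             consecutive += 1
--             max_consecutive = max(max_consecutive, consecutive)
--         else:
--             consecutive = 0
--
--     return max_consecutive
-- ===== SOURCE B (Python) =====
-- from typing import Dict, List, Any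
--
--
-- def _compute_max_consecutive_violations(window_results: List[Dict[str, Any]]) -> int:
--     """Compute maximum consecutive violations across all windows.
--
--     Boundary-gap method: collect the indices of the non-violating windows,
--     bracket them with the virtual boundaries -1 and len(window_results);
--     the longest violation run is the largest gap between two consecutive
--     boundaries, minus one.
--     """
--     n = len(window_results)
--     boundaries = [-1]
--     boundaries += [i for i, w in enumerate(window_results) if not w['has_violations']]
--     boundaries.append(n)
--     return max(b - a - 1 for a, b in zip(boundaries, boundaries[1:]))
-- ===== Notes on version B (the rewrite author's own statement) =====
-- stated objective: alternative
-- what changed: Replaces the running-counter/max state machine with a boundary-gap computation: collect the indices of non-violating windows, bracket them with -1 and n, and return the largest gap between consecutive boundaries minus one.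
import Mathlib
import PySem

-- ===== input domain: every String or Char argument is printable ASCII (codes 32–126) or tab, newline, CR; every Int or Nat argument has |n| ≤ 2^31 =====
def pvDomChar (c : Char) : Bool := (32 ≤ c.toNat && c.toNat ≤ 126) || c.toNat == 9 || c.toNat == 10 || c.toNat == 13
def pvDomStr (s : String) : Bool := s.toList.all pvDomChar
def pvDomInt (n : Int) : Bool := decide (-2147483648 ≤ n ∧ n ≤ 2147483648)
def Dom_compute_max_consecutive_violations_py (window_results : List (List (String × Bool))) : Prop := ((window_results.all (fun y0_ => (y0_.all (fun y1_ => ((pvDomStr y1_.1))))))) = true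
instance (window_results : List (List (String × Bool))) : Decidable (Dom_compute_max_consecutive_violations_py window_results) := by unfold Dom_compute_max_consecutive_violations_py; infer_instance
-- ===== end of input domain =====

-- B replaces A's running-counter/max state machine with a boundary-gap computation
-- (indices of non-violating windows bracketed by -1 and n; answer = largest
-- consecutive-boundary gap minus one); objective: alternative, same O(n) cost.

-- window['has_violations']: first-match lookup in the association list; Pre_ excludes
-- windows missing the key (Python raises KeyError there, .getD default is never claimed).
def pvKey (w : List (String × Bool)) : Bool := (List.lookup "has_violations" w).getD false

-- ===== PORT A =====
def compute_max_consecutive_violations_py (window_results : List (List (String × Bool))) : Int :=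
  (window_results.foldl
    (fun (st : Int × Int) w =>
      if pvKey w then (st.1 + 1, max st.2 (st.1 + 1)) else (0, st.2))
    (0, 0)).2

-- ===== PORT B =====
-- [i for i, w in enumerate(window_results) if not w['has_violations']]
def pvNonViolIdx (i : Int) : List (List (String × Bool)) → List Int
  | [] => []
  | w :: t => if pvKey w then pvNonViolIdx (i + 1) t else i :: pvNonViolIdx (i + 1) t

-- (b - a - 1 for a, b in zip(boundaries, boundaries[1:]))
def pvGaps : List Int → List Int
  | a :: b :: t => (b - a - 1) :: pvGaps (b :: t)
  | _ => []

def compute_max_consecutive_violations_py_alt (window_results : List (List (String × Bool))) : Int :=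
  let boundaries : List Int :=
    -1 :: (pvNonViolIdx 0 window_results ++ [(window_results.length : Int)])
  -- Python's max over a nonempty generator (boundaries always has ≥ 2 elements)
  match pvGaps boundaries with
  | [] => 0  -- unreachable: pvGaps boundaries is always nonempty
  | g :: gs => gs.foldl max g

-- ===== PRECONDITION & SPEC =====
-- Pre_ excludes only inputs where some window lacks the 'has_violations' key: there
-- Python A (and Python B) raise KeyError instead of returning.
def Pre_compute_max_consecutive_violations_py (window_results : List (List (String × Bool))) : Prop :=
  (window_results.all (fun w => w.any (fun p => p.1 == "has_violations"))) = true
instance (window_results : List (List (String × Bool))) : Decidable (Pre_compute_max_consecutive_violations_py window_results) := by unfold Pre_compute_max_consecutive_violations_py; infer_instance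

def pvWitness_compute_max_consecutive_violations_py : (List (List (String × Bool))) :=
  [[("has_violations", true)], [("has_violations", false)], [("has_violations", true)], [("has_violations", true)]]

def Spec_compute_max_consecutive_violations_py (window_results : List (List (String × Bool))) (out : Int) : Prop := out = compute_max_consecutive_violations_py_alt window_results
instance (window_results : List (List (String × Bool))) (out : Int) : Decidable (Spec_compute_max_consecutive_violations_py window_results out) := by unfold Spec_compute_max_consecutive_violations_py; infer_instance

-- ===== CLAIM (what is proved, stated in full; the proofs are below) =====
def Claim_equal_compute_max_consecutive_violations_py : Prop := ∀ (window_results : List (List (String × Bool))), Dom_compute_max_consecutive_violations_py window_results → Pre_compute_max_consecutive_violations_py window_results → Spec_compute_max_consecutive_violations_py window_results (compute_max_consecutive_violations_py window_results)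

-- ===== LEMMAS AND PROOFS =====

-- mathematical form of B's value: mg a ps n = max gap over boundaries a :: ps ++ [n]
def pvMg (a : Int) : List Int → Int → Int
  | [], n => n - a - 1
  | p :: t, n => max (p - a - 1) (pvMg p t n)

lemma pvFoldGaps (ps : List Int) (a n s : Int) :
    List.foldl max s (pvGaps (a :: (ps ++ [n]))) = max s (pvMg a ps n) := by
  induction ps generalizing a s with
  | nil => simp [pvGaps, pvMg]
  | cons p t ih =>
    simp only [List.cons_append, pvGaps, pvMg, List.foldl]
    rw [ih p (max s (p - a - 1)), max_assoc]

lemma pvAltMg (ws : List (List (String × Bool))) :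
    compute_max_consecutive_violations_py_alt ws
      = pvMg (-1) (pvNonViolIdx 0 ws) (ws.length : Int) := by
  unfold compute_max_consecutive_violations_py_alt
  cases h : pvNonViolIdx 0 ws with
  | nil => simp [pvGaps, pvMg]
  | cons p t =>
    simp only [List.cons_append, pvGaps, pvMg]
    rw [pvFoldGaps t p (ws.length : Int) (p - (-1) - 1)]

lemma pvIdxGe (ws : List (List (String × Bool))) (i : Int) :
    ∀ p ∈ pvNonViolIdx i ws, i ≤ p := by
  induction ws generalizing i with
  | nil => simp [pvNonViolIdx]
  | cons w t ih =>
    intro p hp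
    by_cases hk : pvKey w
    · simp only [pvNonViolIdx, hk, if_true] at hp
      have := ih (i + 1) p hp; omega
    · simp only [pvNonViolIdx, if_neg hk, List.mem_cons] at hp
      rcases hp with h | h
      · omega
      · have := ih (i + 1) p h; omega

lemma pvMgGe (ps : List Int) (a j n : Int) (hall : ∀ p ∈ ps, j ≤ p) (hn : j ≤ n) :
    j - a - 1 ≤ pvMg a ps n := by
  cases ps with
  | nil => simp [pvMg]; omega
  | cons p t =>
    have hp : j ≤ p := hall p (by simp)
    simp only [pvMg]
    have : j - a - 1 ≤ p - a - 1 := by omega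
    exact le_trans this (le_max_left _ _)

lemma pvMain (ws : List (List (String × Bool))) (i c m : Int)
    (h0 : 0 ≤ c) (hcm : c ≤ m) :
    (ws.foldl
      (fun (st : Int × Int) w =>
        if pvKey w then (st.1 + 1, max st.2 (st.1 + 1)) else (0, st.2))
      (c, m)).2
    = max m (pvMg (i - c - 1) (pvNonViolIdx i ws) (i + (ws.length : Int))) := by
  induction ws generalizing i c m with
  | nil =>
    simp [pvNonViolIdx, pvMg]
    omega
  | cons w t ih =>
    by_cases hk : pvKey w
    · simp only [List.foldl, hk, if_true, pvNonViolIdx, List.length_cons]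
      have h1 := ih (i + 1) (c + 1) (max m (c + 1)) (by omega) (le_max_right _ _)
      have h2 : (i + 1) - (c + 1) - 1 = i - c - 1 := by omega
      rw [h2] at h1
      have h3 : (i + 1) + (t.length : Int) = i + ((t.length : Int) + 1) := by omega
      rw [h3] at h1
      rw [h1]
      -- max (max m (c+1)) X = max m X since c+1 ≤ X
      have hX : c + 1 ≤ pvMg (i - c - 1) (pvNonViolIdx (i + 1) t) (i + ((t.length : Int) + 1)) := by
        have := pvMgGe (pvNonViolIdx (i + 1) t) (i - c - 1) (i + 1)
          (i + ((t.length : Int) + 1)) (pvIdxGe t (i + 1)) (by omega)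
        omega
      rw [max_assoc, max_eq_right hX]
      push_cast
      ring_nf
    · simp only [List.foldl, if_neg hk, pvNonViolIdx, List.length_cons]
      have h1 := ih (i + 1) 0 m (by omega) (by omega)
      have h2 : (i + 1) - 0 - 1 = i := by omega
      rw [h2] at h1
      have h3 : (i + 1) + (t.length : Int) = i + ((t.length : Int) + 1) := by omega
      rw [h3] at h1
      simp only [pvMg]
      have h4 : i - (i - c - 1) - 1 = c := by omega
      rw [h4]
      rw [← max_assoc, max_eq_left hcm]
      rw [h1]
      push_cast
      ring_nf

-- ===== VERDICT (by name: the statement is the Claim_ definition above) =====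
theorem compute_max_consecutive_violations_py_spec : Claim_equal_compute_max_consecutive_violations_py := by
  intro ws _ _
  unfold Spec_compute_max_consecutive_violations_py compute_max_consecutive_violations_py
  rw [pvAltMg]
  have h := pvMain ws 0 0 0 (by omega) (by omega)
  simp only [show (0 : Int) - 0 - 1 = -1 by omega, zero_add] at h
  rw [h]
  have hX : (0 : Int) ≤ pvMg (-1) (pvNonViolIdx 0 ws) (ws.length : Int) := by
    have := pvMgGe (pvNonViolIdx 0 ws) (-1) 0 (ws.length : Int) (pvIdxGe ws 0) (by positivity)
    omega
  exact max_eq_right hX
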